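-- pv_equiv track=rewrite | github.com/Luxhr47/A-Controlled-Attention-for-Nested-Named-Entity-Recognition | CA/Data/new_data_utils.py | loda_enumeration_data
-- ===== SOURCE A (Python) =====
-- def loda_enumeration_data(sentences_seq):
--     """
--     获得句子所有枚举长度信息  长度不受限制
--     :param word_seq: 文本序列
--     :return: 实体的下标集合
--     """
--     all_entity_list = []
--     for sentence in sentences_seq:
--         sen_list = []
--         L = list(range(len(sentence)))
--         for i,first in enumerate(L):
--             for j,second in enumerate(L):
--                 # if j < i or abs(i - j) >= len(L):
--                 if j < i or abs(i - j) >= 7: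
--                     continue
--                 sub_list = [i,j]
--                 sen_list.append(sub_list)
--         all_entity_list.append(sen_list)
--     return all_entity_list
-- ===== SOURCE B (Python) =====
-- def loda_enumeration_data(sentences_seq):
--     return [
--         [[i, j] for i in range(len(s)) for j in range(i, min(i + 7, len(s)))]
--         for s in sentences_seq
--     ]
-- ===== Notes on version B (the rewrite author's own statement) =====
-- stated objective: faster
-- what changed: B enumerates only the valid pairs directly via j in range(i, min(i+7, n)) in a comprehension, instead of A's nested full O(n^2) scan with a filter; per-sentence cost drops to O(n).
import Mathlib
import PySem

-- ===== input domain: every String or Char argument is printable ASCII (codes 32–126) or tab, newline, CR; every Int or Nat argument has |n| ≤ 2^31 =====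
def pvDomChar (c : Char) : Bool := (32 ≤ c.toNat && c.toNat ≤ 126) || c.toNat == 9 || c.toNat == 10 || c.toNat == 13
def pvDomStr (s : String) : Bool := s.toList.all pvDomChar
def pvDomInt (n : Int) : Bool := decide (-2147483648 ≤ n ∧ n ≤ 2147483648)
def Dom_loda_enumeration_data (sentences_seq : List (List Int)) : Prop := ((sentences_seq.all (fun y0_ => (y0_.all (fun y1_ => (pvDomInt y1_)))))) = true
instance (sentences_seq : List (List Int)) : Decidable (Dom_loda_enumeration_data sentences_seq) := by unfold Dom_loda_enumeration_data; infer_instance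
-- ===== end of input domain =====

-- B enumerates only the valid pairs (i ≤ j < i+7) directly via range(i, min(i+7, n)) instead of A's full nested scan with a filter.

-- ===== PORT A =====
-- literal transliteration: outer loop appends sen_list per sentence; nested loops over enumerate(L); 'continue' = the then-branch
def loda_enumeration_data (sentences_seq : List (List Int)) : List (List (List Int)) :=
  sentences_seq.foldl (fun all_entity_list sentence =>
    let L := PySem.List.pyRange 0 (sentence.length : Int) 1
    let sen_list := (PySem.List.enumerate L).foldl (fun sen_list p =>
      (PySem.List.enumerate L).foldl (fun sen_list q =>
        if q.1 < p.1 ∨ 7 ≤ |p.1 - q.1| then sen_list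
        else sen_list ++ [[p.1, q.1]]) sen_list) []
    all_entity_list ++ [sen_list]) []

-- ===== PORT B =====
-- transliteration of Source B's comprehension: [[i,j] for i in range(n) for j in range(i, min(i+7, n))]
def loda_enumeration_data_alt (sentences_seq : List (List Int)) : List (List (List Int)) :=
  sentences_seq.map (fun s =>
    (PySem.List.pyRange 0 (s.length : Int) 1).flatMap (fun i =>
      (PySem.List.pyRange i (min (i + 7) (s.length : Int)) 1).map (fun j => [i, j])))

-- ===== PRECONDITION & SPEC =====
def Spec_loda_enumeration_data (sentences_seq : List (List Int)) (out : List (List (List Int))) : Prop := out = loda_enumeration_data_alt sentences_seq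
instance (sentences_seq : List (List Int)) (out : List (List (List Int))) : Decidable (Spec_loda_enumeration_data sentences_seq out) := by unfold Spec_loda_enumeration_data; infer_instance

-- ===== CLAIM (what is proved, stated in full; the proofs are below) =====
def Claim_equal_loda_enumeration_data : Prop := ∀ (sentences_seq : List (List Int)), Dom_loda_enumeration_data sentences_seq → Spec_loda_enumeration_data sentences_seq (loda_enumeration_data sentences_seq)

-- ===== LEMMAS AND PROOFS =====

-- enumerate(range(n)) pairs each index with itself
theorem pv_enumerate_pyRange (n : Int) (hn : 0 ≤ n) :
    PySem.List.enumerate (PySem.List.pyRange 0 n 1) 0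
      = (PySem.List.pyRange 0 n 1).map (fun j => (j, j)) := by
  rw [PySem.List.enumerate_eq_map_pyRange (d := 0)]
  have hlen : ((PySem.List.pyRange 0 n 1).length : Int) = n := by
    rw [PySem.List.length_pyRange_one]; omega
  rw [show PySem.List.len (PySem.List.pyRange 0 n 1) = n by rw [PySem.List.len_eq]; exact hlen]
  apply List.map_congr_left
  intro j hj
  rw [PySem.List.mem_pyRange_one] at hj
  have : PySem.List.pyGetD (PySem.List.pyRange 0 n 1) j 0 = j := by
    have := PySem.List.pyGetD_map_pyRange_of_nonneg (f := id) (n := n) (i := j) (d := 0) hj.1 hj.2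
    simpa using this
  rw [this]

-- the filtered full range equals the direct window range, for 0 ≤ i < n
theorem pv_filter_window (n i : Int) (h0 : 0 ≤ i) (hi : i < n) :
    (PySem.List.pyRange 0 n 1).filter (fun j => decide (¬(j < i ∨ 7 ≤ |i - j|)))
      = PySem.List.pyRange i (min (i + 7) n) 1 := by
  set m := min (i + 7) n with hm
  have hml : m ≤ i + 7 := min_le_left _ _
  have hmr : m ≤ n := min_le_right _ _
  have hmc : m = i + 7 ∨ m = n := min_choice _ _
  rw [PySem.List.pyRange_one_append 0 i n h0 (by omega),
      PySem.List.pyRange_one_append i m n (by omega) hmr,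
      List.filter_append, List.filter_append]
  have e1 : (PySem.List.pyRange 0 i 1).filter (fun j => decide (¬(j < i ∨ 7 ≤ |i - j|))) = [] := by
    rw [List.filter_eq_nil_iff]
    intro j hj
    rw [PySem.List.mem_pyRange_one] at hj
    simp only [decide_eq_true_eq, not_not]
    exact Or.inl hj.2
  have e2 : (PySem.List.pyRange i m 1).filter (fun j => decide (¬(j < i ∨ 7 ≤ |i - j|))) = PySem.List.pyRange i m 1 := by
    rw [List.filter_eq_self]
    intro j hj
    rw [PySem.List.mem_pyRange_one] at hj
    simp only [decide_eq_true_eq]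
    push Not
    refine ⟨by omega, ?_⟩
    rw [abs_lt]
    omega
  have e3 : (PySem.List.pyRange m n 1).filter (fun j => decide (¬(j < i ∨ 7 ≤ |i - j|))) = [] := by
    rw [List.filter_eq_nil_iff]
    intro j hj
    rw [PySem.List.mem_pyRange_one] at hj
    simp only [decide_eq_true_eq, not_not]
    right
    rw [le_abs]
    right
    omega
  rw [e1, e2, e3, List.nil_append, List.append_nil]

-- the inner loop appends the filtered pairs
theorem pv_inner (L : List (Int × Int)) (p : Int × Int) (acc : List (List Int)) :
    L.foldl (fun sen_list q =>
      if q.1 < p.1 ∨ 7 ≤ |p.1 - q.1| then sen_list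
      else sen_list ++ [[p.1, q.1]]) acc
    = acc ++ (L.filter (fun q => decide (¬(q.1 < p.1 ∨ 7 ≤ |p.1 - q.1|)))).map (fun q => [p.1, q.1]) := by
  induction L generalizing acc with
  | nil => simp
  | cons q L ih =>
    simp only [List.foldl_cons, List.filter_cons]
    by_cases h : q.1 < p.1 ∨ 7 ≤ |p.1 - q.1|
    · rw [if_pos h, ih]
      simp [h]
    · rw [if_neg h, ih]
      simp [h]

-- one sentence of A equals one sentence of B
theorem pv_sentence_eq (s : List Int) :
    (PySem.List.enumerate (PySem.List.pyRange 0 (s.length : Int) 1)).foldl (fun sen_list p =>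
      (PySem.List.enumerate (PySem.List.pyRange 0 (s.length : Int) 1)).foldl (fun sen_list q =>
        if q.1 < p.1 ∨ 7 ≤ |p.1 - q.1| then sen_list
        else sen_list ++ [[p.1, q.1]]) sen_list) []
      = (PySem.List.pyRange 0 (s.length : Int) 1).flatMap (fun i =>
          (PySem.List.pyRange i (min (i + 7) (s.length : Int)) 1).map (fun j => [i, j])) := by
  have hn : (0 : Int) ≤ (s.length : Int) := Int.natCast_nonneg _
  have houter : (fun (sen_list : List (List Int)) (p : Int × Int) =>
      (PySem.List.enumerate (PySem.List.pyRange 0 (s.length : Int) 1)).foldl (fun sen_list q =>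
        if q.1 < p.1 ∨ 7 ≤ |p.1 - q.1| then sen_list
        else sen_list ++ [[p.1, q.1]]) sen_list)
      = (fun sen_list p => sen_list ++
          ((PySem.List.enumerate (PySem.List.pyRange 0 (s.length : Int) 1)).filter
            (fun q => decide (¬(q.1 < p.1 ∨ 7 ≤ |p.1 - q.1|)))).map (fun q => [p.1, q.1])) :=
    funext fun sen => funext fun p => pv_inner _ p sen
  rw [houter, PySem.List.foldl_append_eq_flatMap, List.nil_append,
      pv_enumerate_pyRange _ hn, List.flatMap_map]
  apply List.flatMap_congr
  intro i hi
  rw [PySem.List.mem_pyRange_one] at hi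
  simp only [List.filter_map, List.map_map, Function.comp_def]
  rw [pv_filter_window _ i hi.1 hi.2]

-- ===== VERDICT (by name: the statement is the Claim_ definition above) =====
theorem loda_enumeration_data_spec : Claim_equal_loda_enumeration_data := by
  intro ss _
  unfold Spec_loda_enumeration_data loda_enumeration_data loda_enumeration_data_alt
  rw [PySem.List.foldl_append_singleton_eq_map]
  exact List.map_congr_left (fun s _ => pv_sentence_eq s)
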